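-- pv_equiv track=rewrite | github.com/limajpp/av3-modelagem | core/gerador_padroes.py | gerar_padroes
-- ===== SOURCE A (Python) =====
-- def gerar_padroes(tam_barra, tam_cortes):
--     qtd_tipos_corte = len(tam_cortes)
--     padroes = []
--
--     def gerar_combinacoes(index, padrao_atual, espaco_restante):
--         if index == qtd_tipos_corte:
--             if sum(padrao_atual) > 0:
--                 padroes.append(padrao_atual[:])
--             return
--
--         tamanho_item_atual = tam_cortes[index]
--         max_itens_atual = espaco_restante // tamanho_item_atual
--
--         for qtd in range(max_itens_atual + 1):
--             padrao_atual[index] = qtd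
--
--             novo_espaco = espaco_restante - (qtd * tamanho_item_atual)
--
--             gerar_combinacoes(index + 1, padrao_atual, novo_espaco)
--
--             padrao_atual[index] = 0
--
--     padrao_inicial = [0] * qtd_tipos_corte
--     gerar_combinacoes(0, padrao_inicial, tam_barra)
--
--     return padroes
-- ===== SOURCE B (Python) =====
-- def gerar_padroes(tam_barra, tam_cortes):
--     partials = [([], tam_barra)]
--     for tam in tam_cortes:
--         partials = [(padrao + [qtd], espaco - qtd * tam)
--                     for (padrao, espaco) in partials
--                     for qtd in range(espaco // tam + 1)]
--     return [padrao for (padrao, espaco) in partials if sum(padrao) > 0]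
-- ===== Notes on version B (the rewrite author's own statement) =====
-- stated objective: alternative
-- what changed: Replaced the pruned recursive DFS (nested function mutating one shared padrao_atual and an outer result list) by an iterative breadth-first pass that rebuilds, layer by layer via a comprehension, the frontier of (partial pattern, remaining space) pairs and filters at the end; no recursion, no mutation, same patterns in the same order.
-- outside the precondition, e.g. on gerar_padroes(-1, [5, 0]): A returns [], B returns []
import Mathlib
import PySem

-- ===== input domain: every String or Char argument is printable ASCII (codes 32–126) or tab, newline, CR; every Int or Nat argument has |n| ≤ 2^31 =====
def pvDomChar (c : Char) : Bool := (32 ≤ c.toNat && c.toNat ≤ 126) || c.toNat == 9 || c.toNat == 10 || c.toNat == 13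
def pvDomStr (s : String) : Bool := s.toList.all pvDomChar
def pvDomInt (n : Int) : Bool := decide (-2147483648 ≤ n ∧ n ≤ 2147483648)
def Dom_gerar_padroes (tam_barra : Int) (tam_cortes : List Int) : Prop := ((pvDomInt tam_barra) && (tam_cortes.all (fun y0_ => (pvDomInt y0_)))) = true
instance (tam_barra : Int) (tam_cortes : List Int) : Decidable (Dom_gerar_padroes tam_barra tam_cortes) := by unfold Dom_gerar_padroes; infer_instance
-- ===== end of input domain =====

-- B replaces A's pruned recursive DFS (mutating one shared pattern) by an iterative breadth-first frontier of (pattern, remaining-space) pairs built layer by layer (alternative decomposition, same output order).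


-- ===== PORT A =====
-- inner recursive helper 'gerar_combinacoes'; the mutable 'padroes' list is threaded as an
-- accumulator and the mutable 'padrao_atual' as a functional list (List.set; the final reset
-- 'padrao_atual[index] = 0' is subsumed by the next iteration's set). Python's leaf test
-- 'index == qtd_tipos_corte' is ported as 'qtd_tipos_corte ≤ index' (identical on every
-- reachable call, where index ≤ length) so that termination is measured by length - index.
def gerarCombinacoes (tam_cortes : List Int) (padroes : List (List Int)) (index : Nat)
    (padrao_atual : List Int) (espaco_restante : Int) : List (List Int) :=
  if _h : tam_cortes.length ≤ index then
    if 0 < padrao_atual.sum then padroes ++ [padrao_atual] else padroes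
  else
    let tamanho_item_atual := tam_cortes.getD index 0
    let max_itens_atual := PySem.Int.floordiv espaco_restante tamanho_item_atual
    (PySem.List.pyRange 0 (max_itens_atual + 1) 1).foldl
      (fun acc qtd =>
        gerarCombinacoes tam_cortes acc (index + 1) (padrao_atual.set index qtd)
          (espaco_restante - qtd * tamanho_item_atual)) padroes
termination_by tam_cortes.length - index
decreasing_by omega

def gerar_padroes (tam_barra : Int) (tam_cortes : List Int) : List (List Int) :=
  gerarCombinacoes tam_cortes [] 0 (List.replicate tam_cortes.length 0) tam_barra

-- ===== PORT B =====
-- the per-layer comprehension: extend every (padrao, espaco) partial by every feasible count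
def gerar_padroes_alt (tam_barra : Int) (tam_cortes : List Int) : List (List Int) :=
  let partials := tam_cortes.foldl
    (fun partials tam => partials.flatMap (fun pr =>
      (PySem.List.pyRange 0 (PySem.Int.floordiv pr.2 tam + 1) 1).map
        (fun qtd => (pr.1 ++ [qtd], pr.2 - qtd * tam))))
    [(([] : List Int), tam_barra)]
  (partials.filter (fun pr => decide (0 < pr.1.sum))).map (fun pr => pr.1)

-- ===== PRECONDITION & SPEC =====
-- Pre_ excludes lists containing a zero cut size, on which A divides by that size and raises
-- ZeroDivisionError whenever the zero's position is reachable (on the remaining, unreachable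
-- zero cases A returns [] after an early empty range, and B returns [] there too).
def Pre_gerar_padroes (tam_barra : Int) (tam_cortes : List Int) : Prop := ∀ c ∈ tam_cortes, c ≠ 0
instance (tam_barra : Int) (tam_cortes : List Int) : Decidable (Pre_gerar_padroes tam_barra tam_cortes) := by
  unfold Pre_gerar_padroes; infer_instance

def pvWitness_gerar_padroes : Int × List Int := (10, [3, 5])

def Spec_gerar_padroes (tam_barra : Int) (tam_cortes : List Int) (out : List (List Int)) : Prop := out = gerar_padroes_alt tam_barra tam_cortes
instance (tam_barra : Int) (tam_cortes : List Int) (out : List (List Int)) : Decidable (Spec_gerar_padroes tam_barra tam_cortes out) := by unfold Spec_gerar_padroes; infer_instance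

-- ===== CLAIM (what is proved, stated in full; the proofs are below) =====
def Claim_equal_gerar_padroes : Prop := ∀ (tam_barra : Int) (tam_cortes : List Int), Dom_gerar_padroes tam_barra tam_cortes → Pre_gerar_padroes tam_barra tam_cortes → Spec_gerar_padroes tam_barra tam_cortes (gerar_padroes tam_barra tam_cortes)

-- ===== LEMMAS AND PROOFS =====

-- common characterisation: the count vectors over sizes cs fitting in espaco, lexicographic order
def pats : Int → List Int → List (List Int)
  | _, [] => [[]]
  | espaco, c :: cs =>
      (PySem.List.pyRange 0 (PySem.Int.floordiv espaco c + 1) 1).flatMap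
        (fun q => (pats (espaco - q * c) cs).map (fun t => q :: t))

theorem take_set_succ (l : List Int) (i : Nat) (a : Int) (h : i < l.length) :
    (l.set i a).take (i+1) = l.take i ++ [a] := by
  rw [List.take_add_one, List.take_set, List.getElem?_set_self (by simpa using h)]
  simp [List.set_eq_of_length_le]

theorem gerarComb_eq (cortes : List Int) (n : Nat) : ∀ (index : Nat), cortes.length - index = n →
    index ≤ cortes.length → ∀ (padrao : List Int), padrao.length = cortes.length →
    ∀ (espaco : Int) (acc : List (List Int)),
    gerarCombinacoes cortes acc index padrao espaco =
      acc ++ ((pats espaco (cortes.drop index)).map (fun q => padrao.take index ++ q)).filter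
        (fun l => decide (0 < l.sum)) := by
  induction n with
  | zero =>
    intro index hn hle padrao hlen espaco acc
    have hidx : index = cortes.length := by omega
    rw [gerarCombinacoes]
    rw [dif_pos (by omega)]
    subst hidx
    rw [List.drop_length]
    simp only [pats]
    rw [← hlen, List.take_length]
    by_cases h : 0 < padrao.sum
    · simp [h, List.filter]
    · simp [h, List.filter]
  | succ n ih =>
    intro index hn hle padrao hlen espaco acc
    have hidx : index < cortes.length := by omega
    rw [gerarCombinacoes]
    rw [dif_neg (by omega)]
    simp only []
    rw [PySem.List.foldl_congr_mem _ _
      (fun a qtd => a ++ ((pats (espaco - qtd * cortes.getD index 0) (cortes.drop (index+1))).map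
          (fun t => padrao.take index ++ [qtd] ++ t)).filter (fun l => decide (0 < l.sum))) _
      (by
        intro a q _
        rw [ih (index+1) (by omega) (by omega) _ (by simp [hlen]) _ _]
        rw [take_set_succ _ _ _ (by omega)])]
    rw [PySem.List.foldl_append_eq_flatMap]
    congr 1
    rw [List.drop_eq_getElem_cons hidx]
    simp only [pats]
    rw [List.getD_eq_getElem _ _ hidx]
    rw [List.map_flatMap, List.filter_flatMap]
    congr 1
    funext q
    congr 1
    simp [List.map_map, Function.comp]

-- the breadth-first layers of B compute exactly the pats-extensions of every partial
theorem layers_eq (cs : List Int) : ∀ (parts : List (List Int × Int)),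
    cs.foldl
      (fun partials tam => partials.flatMap (fun pr =>
        (PySem.List.pyRange 0 (PySem.Int.floordiv pr.2 tam + 1) 1).map
          (fun qtd => (pr.1 ++ [qtd], pr.2 - qtd * tam)))) parts
    = parts.flatMap (fun pr => (pats pr.2 cs).map
        (fun t => (pr.1 ++ t, pr.2 - (List.zipWith (fun q tam => q * tam) t cs).sum))) := by
  induction cs with
  | nil => intro parts; simp [pats]
  | cons c cs ih =>
    intro parts
    rw [List.foldl_cons, ih, List.flatMap_assoc]
    apply List.flatMap_congr
    intro pr _
    simp only [pats]
    rw [List.map_flatMap, List.flatMap_map]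
    apply List.flatMap_congr
    intro q _
    rw [List.map_map]
    apply List.map_congr_left
    intro t _
    simp only [Function.comp_apply, List.zipWith_cons_cons, List.sum_cons]
    refine Prod.ext ?_ ?_
    · simp
    · simp; ring

-- tagging each pattern with its leftover space, filtering on the pattern, and projecting
-- the pattern back is just filtering the patterns
theorem pairs_filter_fst (l : List (List Int)) (g : List Int → Int) :
    ((l.map (fun t => (t, g t))).filter (fun pr => decide (0 < pr.1.sum))).map (fun pr => pr.1)
      = l.filter (fun t => decide (0 < t.sum)) := by
  induction l with
  | nil => simp
  | cons x xs ih => by_cases h : 0 < x.sum <;> simp [h, ih]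

-- ===== VERDICT (by name: the statement is the Claim_ definition above) =====
theorem gerar_padroes_spec : Claim_equal_gerar_padroes := by
  intro tb cortes _dom _hpre
  unfold Spec_gerar_padroes
  unfold gerar_padroes gerar_padroes_alt
  rw [gerarComb_eq cortes cortes.length 0 (by omega) (by omega) (List.replicate cortes.length 0) (by simp) tb []]
  rw [layers_eq cortes [(([] : List Int), tb)]]
  simp only [List.nil_append, List.drop_zero, List.take_zero, List.flatMap_cons,
    List.flatMap_nil, List.append_nil]
  rw [pairs_filter_fst]
  simp
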